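-- pv_equiv track=rewrite | github.com/BashCtl/python-edabit | hard/squishing_list.py | squish
-- ===== SOURCE A (Python) =====
-- def squish(lst, d, result=None):
--     if not lst:
--         return lst
--     if result is None:
--         result = [lst]
--     if len(lst) == 1:
--         return result
--     lst = lst.copy()
--     if d == "left":
--         lst[:2] = [lst[0] + lst[1]]
--     elif d == "right":
--         lst[-2:] = [lst[-2] + lst[-1]]
--     result.append(lst)
--     return squish(lst, d, result)
-- ===== SOURCE B (Python) =====
-- def squish(lst, d, result=None):
--     if not lst:
--         return lst
--     if result is None:
--         result = [lst]
--     cur = lst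
--     while len(cur) > 1:
--         if d == "left":
--             cur = [cur[0] + cur[1], *cur[2:]]
--         elif d == "right":
--             cur = [*cur[:-2], cur[-2] + cur[-1]]
--         result.append(cur)
--     return result
-- ===== Notes on version B (the rewrite author's own statement) =====
-- stated objective: idiomatic
-- what changed: Replaced A's tail recursion (re-passing lst/result through call frames) by a single explicit while loop with an accumulator, merging with list building instead of slice assignment.
import Mathlib
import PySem

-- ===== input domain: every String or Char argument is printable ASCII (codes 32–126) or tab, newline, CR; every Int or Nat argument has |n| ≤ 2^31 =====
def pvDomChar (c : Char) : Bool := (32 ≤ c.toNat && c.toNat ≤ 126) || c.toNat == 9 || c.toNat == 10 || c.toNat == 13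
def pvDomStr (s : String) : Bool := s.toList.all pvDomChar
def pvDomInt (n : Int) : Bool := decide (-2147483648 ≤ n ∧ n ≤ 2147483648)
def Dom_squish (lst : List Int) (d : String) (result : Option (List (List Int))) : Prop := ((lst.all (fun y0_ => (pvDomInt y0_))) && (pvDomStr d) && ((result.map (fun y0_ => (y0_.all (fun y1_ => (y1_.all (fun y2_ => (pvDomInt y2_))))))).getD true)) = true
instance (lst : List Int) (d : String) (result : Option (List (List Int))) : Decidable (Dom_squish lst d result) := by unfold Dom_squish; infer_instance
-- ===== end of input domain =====

-- B replaces A's tail recursion by an explicit while loop with an accumulator (same cost, more idiomatic).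
-- Note: Python A and B both append to the caller-supplied `result` list in place; the equivalence here is about the return value.

-- ===== PORT A =====
-- merge step of A: the two slice assignments; exact for lst of length ≥ 2 (the only way it is reached)
def squishMergeA (lst : List Int) (d : String) : List Int :=
  if d == "left" then
    (lst.getD 0 0 + lst.getD 1 0) :: lst.drop 2          -- lst[:2] = [lst[0] + lst[1]]
  else if d == "right" then
    lst.take (lst.length - 2) ++ [lst.getD (lst.length - 2) 0 + lst.getD (lst.length - 1) 0]  -- lst[-2:] = [lst[-2] + lst[-1]]
  else lst

-- A's recursion; fuel only makes the recursion total — with d ∈ {"left","right"} the length drops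
-- by 1 each call, so fuel = lst.length never runs out (fuel 0 is unreachable under Pre_)
def squishGo : Nat → List Int → String → Option (List (List Int)) → List (List Int)
  | 0, _, _, _ => []
  | fuel+1, lst, d, result =>
    if lst = [] then []
    else
      let res := result.getD [lst]
      if lst.length = 1 then res
      else
        let lst' := squishMergeA lst d
        squishGo fuel lst' d (some (res ++ [lst']))

def squish (lst : List Int) (d : String) (result : Option (List (List Int))) : List (List Int) :=
  squishGo lst.length lst d result

-- ===== PORT B =====
-- merge step of B's loop body
def squishMergeB (cur : List Int) (d : String) : List Int :=
  if d == "left" then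
    match cur with                                        -- [cur[0] + cur[1], *cur[2:]], reached only with length ≥ 2
    | a :: b :: rest => (a + b) :: rest
    | _ => cur
  else if d == "right" then
    cur.dropLast.dropLast ++ [cur.dropLast.getLastD 0 + cur.getLastD 0]  -- [*cur[:-2], cur[-2] + cur[-1]]
  else cur

-- the while loop: fuel = initial length bounds the iterations (each one shortens cur by 1)
def squishLoop : Nat → List Int → String → List (List Int) → List (List Int)
  | 0, _, _, result => result
  | fuel+1, cur, d, result =>
    if 1 < cur.length then
      let nxt := squishMergeB cur d
      squishLoop fuel nxt d (result ++ [nxt])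
    else result

def squish_alt (lst : List Int) (d : String) (result : Option (List (List Int))) : List (List Int) :=
  if lst = [] then []
  else squishLoop lst.length lst d (result.getD [lst])

-- ===== PRECONDITION & SPEC =====
-- Pre_ excludes only the inputs where Python A raises: with more than one element and a direction
-- other than "left"/"right" the recursion never shrinks lst and A dies with RecursionError.
def Pre_squish (lst : List Int) (d : String) (result : Option (List (List Int))) : Prop :=
  1 < lst.length → (d = "left" ∨ d = "right")
instance (lst : List Int) (d : String) (result : Option (List (List Int))) : Decidable (Pre_squish lst d result) := by unfold Pre_squish; infer_instance

def pvWitness_squish : List Int × String × Option (List (List Int)) := ([1, 2, 3], "left", none)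

def Spec_squish (lst : List Int) (d : String) (result : Option (List (List Int))) (out : List (List Int)) : Prop := out = squish_alt lst d result
instance (lst : List Int) (d : String) (result : Option (List (List Int))) (out : List (List Int)) : Decidable (Spec_squish lst d result out) := by unfold Spec_squish; infer_instance

-- ===== CLAIM (what is proved, stated in full; the proofs are below) =====
def Claim_equal_squish : Prop := ∀ (lst : List Int) (d : String) (result : Option (List (List Int))), Dom_squish lst d result → Pre_squish lst d result → Spec_squish lst d result (squish lst d result)

-- ===== LEMMAS AND PROOFS =====

-- the two merge steps agree on lists of length ≥ 2 for the valid directions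
lemma merge_eq (lst : List Int) (d : String) (hd : d = "left" ∨ d = "right")
    (hl : 2 ≤ lst.length) : squishMergeA lst d = squishMergeB lst d := by
  rcases hd with rfl | rfl
  · match lst, hl with
    | a :: b :: rest, _ => simp [squishMergeA, squishMergeB]
  · have hne : lst ≠ [] := by intro h; rw [h] at hl; simp at hl
    simp only [squishMergeA, squishMergeB, String.reduceBEq, Bool.false_eq_true, if_false, if_true]
    have h1 : lst.dropLast.dropLast = List.take (lst.length - 2) lst := by
      rw [List.dropLast_eq_take, List.dropLast_eq_take, List.take_take, List.length_take]
      congr 1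
      omega
    have h2 : lst.dropLast.getLast?.getD 0 = lst[lst.length - 2]?.getD 0 := by
      rw [List.getLast?_eq_getElem?, List.length_dropLast, List.getElem?_dropLast,
          if_pos (by omega)]
      have e : lst.length - 1 - 1 = lst.length - 2 := by omega
      rw [e]
    have h3 : lst.getLast?.getD 0 = lst[lst.length - 1]?.getD 0 := by
      rw [List.getLast?_eq_getElem?]
    simp only [List.getD_eq_getElem?_getD, List.getLastD_eq_getLast?]
    rw [h1, h2, h3]

-- merging a valid direction shortens the list by exactly 1
lemma merge_len (lst : List Int) (d : String) (hd : d = "left" ∨ d = "right")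
    (hl : 2 ≤ lst.length) : (squishMergeA lst d).length = lst.length - 1 := by
  rcases hd with rfl | rfl
  · match lst, hl with
    | a :: b :: rest, _ => simp [squishMergeA]
  · match lst, hl with
    | a :: b :: rest, _ =>
      simp [squishMergeA]
      omega

-- swapping the optional accumulator for its default makes no difference once lst is nonempty
lemma go_some (fuel : Nat) (lst : List Int) (d : String) (result : Option (List (List Int)))
    (hne : lst ≠ []) :
    squishGo (fuel+1) lst d result = squishGo (fuel+1) lst d (some (result.getD [lst])) := by
  simp [squishGo, hne]

-- A's recursion with an explicit accumulator equals B's loop, for valid directions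
lemma go_eq_loop (fuel : Nat) : ∀ (cur : List Int) (d : String) (acc : List (List Int)),
    (d = "left" ∨ d = "right") → fuel = cur.length → cur ≠ [] →
    squishGo fuel cur d (some acc) = squishLoop fuel cur d acc := by
  induction fuel with
  | zero =>
    intro cur d acc _ hlen hne
    exact absurd (List.length_eq_zero_iff.mp hlen.symm) hne
  | succ fuel ih =>
    intro cur d acc hd hlen hne
    simp only [squishGo, squishLoop, if_neg hne, Option.getD_some]
    by_cases h1 : cur.length = 1
    · rw [if_pos h1, if_neg (by omega)]
    · have h2 : 2 ≤ cur.length := by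
        have : cur.length ≠ 0 := by simpa using hne
        omega
      rw [if_neg h1, if_pos (by omega)]
      rw [merge_eq cur d hd h2]
      have hlen' := merge_len cur d hd h2
      rw [merge_eq cur d hd h2] at hlen'
      apply ih _ _ _ hd (by omega)
      intro hnil
      rw [hnil] at hlen'
      simp at hlen'
      omega

-- ===== VERDICT (by name: the statement is the Claim_ definition above) =====
theorem squish_spec : Claim_equal_squish := by
  intro lst d result _ hpre
  unfold Spec_squish squish squish_alt
  by_cases hne : lst = []
  · subst hne
    simp [squishGo]
  · rw [if_neg hne]
    obtain ⟨k, hk⟩ : ∃ k, lst.length = k + 1 := by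
      have : lst.length ≠ 0 := by simpa using hne
      exact ⟨lst.length - 1, by omega⟩
    by_cases h1 : lst.length = 1
    · rw [hk]
      have hk0 : k = 0 := by omega
      subst hk0
      simp [squishGo, squishLoop, hne, h1]
    · have hd : d = "left" ∨ d = "right" := hpre (by omega)
      rw [hk, go_some k lst d result hne]
      exact go_eq_loop (k+1) lst d (result.getD [lst]) hd hk.symm hne
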